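-- pv_equiv track=rewrite | github.com/This-is-leeo/ENGR133-Group-3 | QuizzesEtc/10-10-CQ3/CQ3_C_yu1398.py | data_analysis
-- ===== SOURCE A (Python) =====
-- def data_analysis(data):
--     output_data = []
--     calculated_value = 0
--
--     row_start = 0
--     row_end = len(data)
--     column_start = 0
--     column_end = len(data[0])
--
--     i = 0
--     while i < row_end:
--         new_row = []
--         j = 0
--         while j < column_end:
--             value = data[i][j]
--             new_row.append(value)
--             calculated_value += abs(value)
--             if calculated_value > 70000:
--                 output_data.append(new_row)
--
--                 return output_data, i+1, j+1
--             j += 1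
--         output_data.append(new_row)
--         i += 1
--     return output_data, i+1, j+1
-- ===== SOURCE B (Python) =====
-- def data_analysis(data):
--     # Two-phase: first locate the crossing point (i, j) where the running
--     # sum of abs values first exceeds 70000, then build the output by slicing.
--     w = len(data[0])
--     total = 0
--     cross = None
--     for i, row in enumerate(data):
--         for j in range(w):
--             total += abs(row[j])
--             if total > 70000:
--                 cross = (i, j)
--                 break
--         if cross is not None:
--             break
--     if cross is None:
--         return [row[:w] for row in data], len(data) + 1, w + 1
--     i, j = cross
--     return [row[:w] for row in data[:i]] + [data[i][:j + 1]], i + 1, j + 1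
-- ===== Notes on version B (the rewrite author's own statement) =====
-- stated objective: alternative
-- what changed: B separates finding the first crossing point (i,j) of the running abs-sum from building the output, which it then constructs by whole-row slices data[:i] plus the partial slice data[i][:j+1], instead of A's interleaved append-while-scanning loops.
-- outside the precondition, e.g. on data_analysis([[70001], []]): A returns ([[70001]], 1, 1), B returns ([[70001]], 1, 1)
import Mathlib
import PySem

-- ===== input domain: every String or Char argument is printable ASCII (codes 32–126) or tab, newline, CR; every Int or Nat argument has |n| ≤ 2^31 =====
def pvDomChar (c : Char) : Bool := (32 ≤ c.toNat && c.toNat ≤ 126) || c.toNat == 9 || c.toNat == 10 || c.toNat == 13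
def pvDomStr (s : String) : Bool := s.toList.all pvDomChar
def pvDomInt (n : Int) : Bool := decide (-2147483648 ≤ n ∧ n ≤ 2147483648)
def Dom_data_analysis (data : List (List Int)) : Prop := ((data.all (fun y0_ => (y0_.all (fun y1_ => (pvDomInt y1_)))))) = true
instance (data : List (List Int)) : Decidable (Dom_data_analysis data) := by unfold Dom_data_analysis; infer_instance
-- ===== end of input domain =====

-- B finds the crossing point first and then builds the output by row slices,
-- instead of A's interleaved append-while-scanning loops (alternative decomposition, same cost).


-- ===== PORT A =====
-- inner while loop: scans indices j, j+1, … (fuel = column_end - j), appending values to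
-- the accumulator `acc` (new_row, reversed) and adding |value| to calculated_value `c`;
-- returns (new_row, calculated_value, some j) if the threshold was crossed at column j.
def aInner (row : List Int) : Nat → Nat → List Int → Int → (List Int × Int × Option Nat)
  | 0, _, acc, c => (acc.reverse, c, none)
  | fuel+1, j, acc, c =>
    let v := (PySem.List.pyGet? row (j : Int)).getD 0
    let c' := c + |v|
    if c' > 70000 then ((v :: acc).reverse, c', some j)
    else aInner row fuel (j+1) (v :: acc) c'

-- outer while loop over the rows; `i` is the row counter, `out` the output rows (reversed).
def aOuter (colEnd : Nat) : List (List Int) → Nat → List (List Int) → Int → (List (List Int) × Int × Int)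
  | [], i, out, _ => (out.reverse, (i : Int) + 1, (colEnd : Int) + 1)
  | r :: rs, i, out, c =>
    match aInner r colEnd 0 [] c with
    | (nr, c', none) => aOuter colEnd rs (i+1) (nr :: out) c'
    | (nr, _, some j) => ((nr :: out).reverse, (i : Int) + 1, (j : Int) + 1)

def data_analysis (data : List (List Int)) : List (List Int) × Int × Int :=
  -- column_end = len(data[0]); Pre_ excludes data = []
  aOuter ((PySem.List.pyGet? data 0).getD []).length data 0 [] 0

-- ===== PORT B =====
-- phase 1, inner: scan row[j] for j in range(w), adding |row[j]| to the running total;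
-- returns the new total and (some j) if it crossed 70000 at column j.
def bScanRow (row : List Int) : Nat → Nat → Int → (Int × Option Nat)
  | 0, _, t => (t, none)
  | fuel+1, j, t =>
    let t' := t + |(PySem.List.pyGet? row (j : Int)).getD 0|
    if t' > 70000 then (t', some j) else bScanRow row fuel (j+1) t'

-- phase 1, outer: first row offset k (relative to the start, = enumerate's i) and column j
-- at which the running total crosses 70000, or none.
def bScan (w : Nat) : List (List Int) → Int → Option (Nat × Nat)
  | [], _ => none
  | r :: rs, t =>
    match bScanRow r w 0 t with
    | (t', none) => (bScan w rs t').map (fun p => (p.1 + 1, p.2))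
    | (_, some j) => some (0, j)

-- phase 2: build the output by slicing ([row[:w] for row in …] = map (take w), data[i][:j+1] = take (j+1)).
def data_analysis_alt (data : List (List Int)) : List (List Int) × Int × Int :=
  -- w = len(data[0]); Pre_ excludes data = []
  match bScan ((PySem.List.pyGet? data 0).getD []).length data 0 with
  | none => (data.map (fun r => r.take ((PySem.List.pyGet? data 0).getD []).length),
             (data.length : Int) + 1, (((PySem.List.pyGet? data 0).getD []).length : Int) + 1)
  | some (i, j) =>
    ((data.take i).map (fun r => r.take ((PySem.List.pyGet? data 0).getD []).length)
       ++ [((PySem.List.pyGet? data (i : Int)).getD []).take (j+1)],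
     (i : Int) + 1, (j : Int) + 1)

-- ===== PRECONDITION & SPEC =====
-- Pre_ excludes empty `data` (A raises IndexError on len(data[0])) and ragged grids with a row
-- shorter than row 0: on those A raises IndexError unless the sum crosses 70000 before the short
-- row is reached, an accident of where the crossing falls (B behaves identically there anyway).
def Pre_data_analysis (data : List (List Int)) : Prop :=
  data ≠ [] ∧ ∀ r ∈ data, data.headI.length ≤ r.length
instance (data : List (List Int)) : Decidable (Pre_data_analysis data) := by
  unfold Pre_data_analysis; infer_instance

def pvWitness_data_analysis : List (List Int) := [[1, -2], [30000, 50000]]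

def Spec_data_analysis (data : List (List Int)) (out : List (List Int) × Int × Int) : Prop := out = data_analysis_alt data
instance (data : List (List Int)) (out : List (List Int) × Int × Int) : Decidable (Spec_data_analysis data out) := by unfold Spec_data_analysis; infer_instance

-- ===== CLAIM (what is proved, stated in full; the proofs are below) =====
def Claim_equal_data_analysis : Prop := ∀ (data : List (List Int)), Dom_data_analysis data → Pre_data_analysis data → Spec_data_analysis data (data_analysis data)

-- ===== LEMMAS AND PROOFS =====

-- if the row scan reports a crossing at j', then j ≤ j' < j + fuel
lemma bScanRow_some_range (row : List Int) :
    ∀ (fuel j : Nat) (c t : Int) (j' : Nat),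
      bScanRow row fuel j c = (t, some j') → j ≤ j' ∧ j' < j + fuel := by
  intro fuel
  induction fuel with
  | zero => intro j c t j' h; simp [bScanRow] at h
  | succ n ih =>
    intro j c t j' h
    simp only [bScanRow] at h
    split at h
    · cases h; omega
    · have := ih (j+1) _ t j' h; omega

-- A's inner loop computes the same total/crossing as B's row scan, and the row it builds is a slice.
lemma inner_eq (row : List Int) :
    ∀ (fuel j : Nat) (acc : List Int) (c : Int),
      j + fuel ≤ row.length →
      aInner row fuel j acc c =
        (match bScanRow row fuel j c with
         | (t, none) => (acc.reverse ++ (row.drop j).take fuel, t, none)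
         | (t, some j') => (acc.reverse ++ (row.take (j'+1)).drop j, t, some j')) := by
  intro fuel
  induction fuel with
  | zero => intro j acc c _; simp [aInner, bScanRow]
  | succ n ih =>
    intro j acc c hlen
    have hj : j < row.length := by omega
    have hget : (PySem.List.pyGet? row (j : Int)).getD 0 = row[j] := by
      simp [hj]
    simp only [aInner, bScanRow, hget]
    by_cases hc : c + |row[j]| > 70000
    · simp only [if_pos hc]
      have : (row.take (j+1)).drop j = [row[j]] := by
        rw [List.drop_take, List.drop_eq_getElem_cons hj]
        have h1 : j + 1 - j = 1 := by omega
        rw [h1, List.take_succ_cons, List.take_zero]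
      simp [this]
    · simp only [if_neg hc]
      rw [ih (j+1) (row[j] :: acc) (c + |row[j]|) (by omega)]
      rcases hs : bScanRow row n (j+1) (c + |row[j]|) with ⟨t, oj⟩
      cases oj with
      | none =>
        simp only
        have : (row.drop j).take (n+1) = row[j] :: ((row.drop (j+1)).take n) := by
          rw [List.drop_eq_getElem_cons hj, List.take_succ_cons]
        simp [this]
      | some j' =>
        have hrange := bScanRow_some_range row n (j+1) _ t j' hs
        simp only
        have hj'len : j < (row.take (j'+1)).length := by
          simp [List.length_take]; omega
        have : (row.take (j'+1)).drop j = row[j] :: ((row.take (j'+1)).drop (j+1)) := by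
          rw [List.drop_eq_getElem_cons hj'len]
          congr 1
          rw [List.getElem_take]
        simp [this]

-- A's outer loop equals slicing `rows` at B's crossing point.
lemma outer_eq (w : Nat) :
    ∀ (rows : List (List Int)) (i : Nat) (out : List (List Int)) (c : Int),
      (∀ r ∈ rows, w ≤ r.length) →
      aOuter w rows i out c =
        (match bScan w rows c with
         | none => (out.reverse ++ rows.map (fun r => r.take w), ((i + rows.length : Nat) : Int) + 1, (w : Int) + 1)
         | some (k, j) =>
            (out.reverse ++ (rows.take k).map (fun r => r.take w) ++ [((rows[k]?).getD []).take (j+1)],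
             ((i + k : Nat) : Int) + 1, (j : Int) + 1)) := by
  intro rows
  induction rows with
  | nil => intro i out c _; simp [aOuter, bScan]
  | cons r rs ih =>
    intro i out c hlen
    have hr : w ≤ r.length := hlen r (by simp)
    simp only [aOuter, bScan]
    rw [inner_eq r w 0 [] c (by omega)]
    rcases hs : bScanRow r w 0 c with ⟨t, oj⟩
    cases oj with
    | some j =>
      simp
    | none =>
      simp only
      simp only [List.reverse_nil, List.nil_append, List.drop_zero]
      rw [ih (i+1) (((r.take w) :: out)) t (fun x hx => hlen x (by simp [hx]))]
      rcases hb : bScan w rs t with _ | ⟨k, j⟩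
      · simp
        omega
      · simp
        omega

-- ===== VERDICT (by name: the statement is the Claim_ definition above) =====
theorem data_analysis_spec : Claim_equal_data_analysis := by
  intro data _ hpre
  obtain ⟨hne, hlen⟩ := hpre
  unfold Spec_data_analysis data_analysis data_analysis_alt
  cases data with
  | nil => exact absurd rfl hne
  | cons r rs =>
    simp only [List.headI] at hlen
    have h0 : (PySem.List.pyGet? (r :: rs) (0 : Int)).getD [] = r := by
      have : ((0 : Nat) : Int) = (0 : Int) := rfl
      rw [← this, PySem.List.pyGet?_natCast]; rfl
    rw [h0]
    rw [outer_eq r.length (r :: rs) 0 [] 0 (by intro x hx; exact hlen x hx)]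
    rcases hb : bScan r.length (r :: rs) 0 with _ | ⟨k, j⟩
    · simp
    · simp [PySem.List.pyGet?_natCast]
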